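-- pv_equiv track=rewrite | github.com/vinayakgrover/sonic-sanitize | streamlit_app.py | highlight_pii_tags
-- ===== SOURCE A (Python) =====
-- def highlight_pii_tags(text: str) -> str:
--     """Highlight PII tags with colored HTML spans."""
--     tag_colors = {
--         '[CITY]': '#3B82F6',      # Blue
--         '[STATE]': '#10B981',     # Green
--         '[DAY]': '#F59E0B',       # Amber
--         '[MONTH]': '#8B5CF6',     # Purple
--         '[COLOR]': '#EF4444',     # Red
--     }
--
--     highlighted = text
--     for tag, color in tag_colors.items():
--         highlighted = highlighted.replace(
--             tag,
--             f'<span style="background-color: {color}; padding: 2px 8px; border-radius: 4px; font-weight: 600; color: white; font-size: 0.85rem;">{tag}</span>'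
--         )
--
--     return highlighted
-- ===== SOURCE B (Python) =====
-- def highlight_pii_tags(text: str) -> str:
--     """Highlight PII tags with colored HTML spans (single left-to-right scan)."""
--     tag_colors = {
--         '[CITY]': '#3B82F6',      # Blue
--         '[STATE]': '#10B981',     # Green
--         '[DAY]': '#F59E0B',       # Amber
--         '[MONTH]': '#8B5CF6',     # Purple
--         '[COLOR]': '#EF4444',     # Red
--     }
--
--     parts = []
--     i = 0
--     n = len(text)
--     while i < n:
--         for tag, color in tag_colors.items():
--             if text.startswith(tag, i):
--                 parts.append(
--                     f'<span style="background-color: {color}; padding: 2px 8px; border-radius: 4px; font-weight: 600; color: white; font-size: 0.85rem;">{tag}</span>'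
--                 )
--                 i += len(tag)
--                 break
--         else:
--             parts.append(text[i])
--             i += 1
--     return ''.join(parts)
-- ===== Notes on version B (the rewrite author's own statement) =====
-- stated objective: alternative
-- what changed: Replaces A's five sequential whole-string str.replace passes by a single left-to-right scan that, at each position, dispatches on the first matching tag and emits its colored span (regex-sub style single pass).
import Mathlib
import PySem

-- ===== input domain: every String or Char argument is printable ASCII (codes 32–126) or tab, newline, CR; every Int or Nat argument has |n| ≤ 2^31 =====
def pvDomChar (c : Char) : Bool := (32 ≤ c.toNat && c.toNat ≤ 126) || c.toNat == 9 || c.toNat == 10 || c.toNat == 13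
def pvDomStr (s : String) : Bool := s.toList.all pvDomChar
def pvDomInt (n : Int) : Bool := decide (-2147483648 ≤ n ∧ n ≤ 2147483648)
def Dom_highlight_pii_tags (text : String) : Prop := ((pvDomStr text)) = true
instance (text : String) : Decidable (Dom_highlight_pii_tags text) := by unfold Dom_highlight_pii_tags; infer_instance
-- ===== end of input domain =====

-- B replaces A's five sequential str.replace passes by one left-to-right scan dispatching on the
-- first matching tag (alternative single-pass algorithm; return value only, no mutation involved).

-- ===== PORT A =====
def pvTagColorsA : PySem.Dict String String :=
  PySem.Dict.ofList
  [("[CITY]", "#3B82F6"), ("[STATE]", "#10B981"), ("[DAY]", "#F59E0B"),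
   ("[MONTH]", "#8B5CF6"), ("[COLOR]", "#EF4444")]

-- the f-string template of A, as a concatenation (Str.join "")
def pvSpanA (color tag : String) : String :=
  PySem.Str.join "" ["<span style=\"background-color: ", color,
    "; padding: 2px 8px; border-radius: 4px; font-weight: 600; color: white; font-size: 0.85rem;\">",
    tag, "</span>"]

def highlight_pii_tags (text : String) : String :=
  (PySem.Dict.items pvTagColorsA).foldl
    (fun highlighted p => PySem.Str.replace highlighted p.1 (pvSpanA p.2 p.1)) text

-- ===== PORT B =====
def pvTagColorsB : PySem.Dict String String :=
  PySem.Dict.ofList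
  [("[CITY]", "#3B82F6"), ("[STATE]", "#10B981"), ("[DAY]", "#F59E0B"),
   ("[MONTH]", "#8B5CF6"), ("[COLOR]", "#EF4444")]

def pvSpanB (color tag : String) : String :=
  PySem.Str.join "" ["<span style=\"background-color: ", color,
    "; padding: 2px 8px; border-radius: 4px; font-weight: 600; color: white; font-size: 0.85rem;\">",
    tag, "</span>"]

-- B's while-loop over positions, as recursion on the remaining characters; the inner
-- for/else is the find? over the dict items ('text.startswith(tag, i)').
def pvScanB : List Char → List String
  | [] => []
  | c :: t =>
    match (PySem.Dict.items pvTagColorsB).find? (fun p => p.1.toList.isPrefixOf (c :: t)) with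
    | some p => pvSpanB p.2 p.1 :: pvScanB (t.drop (p.1.toList.length - 1))
    | none => String.ofList [c] :: pvScanB t
termination_by s => s.length

def highlight_pii_tags_alt (text : String) : String :=
  PySem.Str.join "" (pvScanB text.toList)

-- ===== PRECONDITION & SPEC =====
def Spec_highlight_pii_tags (text : String) (out : String) : Prop := out = highlight_pii_tags_alt text
instance (text : String) (out : String) : Decidable (Spec_highlight_pii_tags text out) := by unfold Spec_highlight_pii_tags; infer_instance

-- ===== CLAIM (what is proved, stated in full; the proofs are below) =====
def Claim_equal_highlight_pii_tags : Prop := ∀ (text : String), Dom_highlight_pii_tags text → Spec_highlight_pii_tags text (highlight_pii_tags text)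

-- ===== LEMMAS AND PROOFS =====

-- clean structural form of Python's str.replace for a nonempty pattern
def pvRepl (old new : List Char) : List Char → List Char
  | [] => []
  | c :: t =>
    if old.isPrefixOf (c :: t) then new ++ pvRepl old new (t.drop (old.length - 1))
    else c :: pvRepl old new t
termination_by s => s.length

theorem pvRepl_go_eq (old new : List Char) (h : old ≠ []) :
    ∀ (fuel : Nat) (l acc : List Char), l.length ≤ fuel →
      PySem.Chars.replace.go old new fuel l acc = acc.reverse ++ pvRepl old new l := by
  intro fuel
  induction fuel with
  | zero =>
    intro l acc hl
    have : l = [] := List.eq_nil_of_length_eq_zero (Nat.le_zero.mp hl)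
    subst this
    rw [PySem.Chars.replace.go.eq_def]
    simp [pvRepl]
  | succ n ih =>
    intro l acc hl
    match l with
    | [] => rw [PySem.Chars.replace.go.eq_def]; simp [pvRepl]
    | c :: t =>
      rw [PySem.Chars.replace.go.eq_def]
      simp only []
      by_cases hp : old.isPrefixOf (c :: t)
      · have hol : 1 ≤ old.length := by
          cases old with
          | nil => exact absurd rfl h
          | cons a b => simp
        rw [if_pos hp]
        have hdrop : List.drop old.length (c :: t) = t.drop (old.length - 1) := by
          cases old with
          | nil => exact absurd rfl h
          | cons a b => simp
        rw [hdrop, ih _ _ (by simp at hl ⊢; omega)]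
        rw [pvRepl]
        simp [hp]
      · rw [if_neg hp, ih _ _ (by simp at hl ⊢; omega)]
        rw [pvRepl]
        simp [hp]

theorem pvReplace_eq (old new s : List Char) (h : old ≠ []) :
    PySem.Chars.replace s old new = pvRepl old new s := by
  rw [PySem.Chars.replace]
  rw [if_neg (by simpa [List.isEmpty_iff] using h)]
  rw [pvRepl_go_eq old new h s.length s [] (le_refl _)]
  simp

-- decidable "no occurrence of t can start inside a" check
def pvHb (a t : List Char) : Bool :=
  (List.range a.length).all fun p => !(t.isPrefixOf (a.drop p)) && !((a.drop p).isPrefixOf t)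

theorem pvHb_no_prefix {a t : List Char} (h : pvHb a t = true) :
    ∀ (b : List Char) (p : Nat), p < a.length → ¬ t <+: (a.drop p ++ b) := by
  intro b p hp hpre
  have h2 := (List.all_eq_true.mp h p (List.mem_range.mpr hp))
  simp only [Bool.and_eq_true, Bool.not_eq_true'] at h2
  have hcomp := List.prefix_or_prefix_of_prefix hpre (List.prefix_append (a.drop p) b)
  rcases hcomp with hc | hc
  · exact absurd (List.isPrefixOf_iff_prefix.mpr hc) (by simp [h2.1])
  · exact absurd (List.isPrefixOf_iff_prefix.mpr hc) (by simp [h2.2])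

theorem pvRepl_append (t r a b : List Char)
    (h : ∀ p, p < a.length → ¬ t <+: (a.drop p ++ b)) :
    pvRepl t r (a ++ b) = a ++ pvRepl t r b := by
  induction a with
  | nil => simp
  | cons c a' ih =>
    rw [List.cons_append, pvRepl]
    rw [if_neg (by
      intro hp
      exact h 0 (by simp) (by simpa using List.isPrefixOf_iff_prefix.mp hp))]
    rw [ih (fun p hp => by simpa using h (p + 1) (by simpa using hp))]
    simp

-- proof-side generic one-pass scan over a list of (tag, replacement) pairs
def pvScanT (ts : List (List Char × List Char)) : List Char → List Char
  | [] => []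
  | c :: t =>
    match ts.find? (fun p => p.1.isPrefixOf (c :: t)) with
    | some p => p.2 ++ pvScanT ts (t.drop (p.1.length - 1))
    | none => c :: pvScanT ts t
termination_by s => s.length

theorem pvScanT_nil (s : List Char) : pvScanT [] s = s := by
  induction s with
  | nil => rw [pvScanT]
  | cons c t ih => rw [pvScanT]; simp [ih]

theorem pvScanT_append (ts : List (List Char × List Char)) (a b : List Char)
    (h : ∀ p, p < a.length → ∀ q ∈ ts, ¬ q.1 <+: (a.drop p ++ b)) :
    pvScanT ts (a ++ b) = a ++ pvScanT ts b := by
  induction a with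
  | nil => simp
  | cons c a' ih =>
    rw [List.cons_append, pvScanT]
    have hnone : (ts.find? (fun p => p.1.isPrefixOf (c :: (a' ++ b)))) = none := by
      apply List.find?_eq_none.mpr
      intro q hq
      simp only [Bool.not_eq_true]
      cases hqp : q.1.isPrefixOf (c :: (a' ++ b)) with
      | false => rfl
      | true =>
        exact absurd (by simpa using List.isPrefixOf_iff_prefix.mp hqp) (h 0 (by simp) q hq)
    rw [hnone]
    simp only []
    rw [ih (fun p hp q hq => by simpa using h (p + 1) (by simpa using hp) q hq)]
    simp

theorem pvScanT_reflect (ts : List (List Char × List Char))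
    (hr : ∀ q ∈ ts, q.2.head? = some '<') :
    ∀ (n : Nat) (u body : List Char), u.length ≤ n →
      (∀ ch ∈ body, ch ≠ '<') → body <+: pvScanT ts u → body <+: u := by
  intro n
  induction n with
  | zero =>
    intro u body hu hb hpre
    have : u = [] := List.eq_nil_of_length_eq_zero (Nat.le_zero.mp hu)
    subst this
    rw [pvScanT] at hpre
    exact hpre
  | succ n ih =>
    intro u body hu hb hpre
    match u with
    | [] => rw [pvScanT] at hpre; exact hpre
    | c :: t =>
      rw [pvScanT] at hpre
      cases hfind : (ts.find? (fun p => p.1.isPrefixOf (c :: t))) with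
      | some q =>
        rw [hfind] at hpre
        match body with
        | [] => exact List.nil_prefix
        | ch :: body' =>
          exfalso
          have hq2 := hr q (List.mem_of_find?_eq_some hfind)
          have hhead : (q.2 ++ pvScanT ts (t.drop (q.1.length - 1))).head? = some '<' := by
            rw [List.head?_append, hq2]; rfl
          obtain ⟨w, hw⟩ := hpre
          have : ch = '<' := by
            have h4 := congrArg List.head? hw
            rw [hhead] at h4
            simpa using h4
          exact hb ch (by simp) this
      | none =>
        rw [hfind] at hpre
        match body with
        | [] => exact List.nil_prefix
        | ch :: body' =>
          rw [List.cons_prefix_cons] at hpre ⊢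
          refine ⟨hpre.1, ih t body' (by simpa using hu) (fun x hx => hb x (by simp [hx])) hpre.2⟩

-- the key step: one more sequential replace equals extending the scan's tag list
theorem pvStep (ts : List (List Char × List Char)) (t r : List Char)
    (ht : t ≠ [])
    (hbody : (t.drop 1).all (fun ch => ch != '<') = true)
    (hr : ∀ q ∈ ts, q.2.head? = some '<')
    (hHbR : ∀ q ∈ ts, pvHb q.2 t = true)
    (hHbT : ∀ q ∈ ts, pvHb t q.1 = true) :
    ∀ (n : Nat) (s : List Char), s.length ≤ n →
      pvRepl t r (pvScanT ts s) = pvScanT (ts ++ [(t, r)]) s := by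
  intro n
  induction n with
  | zero =>
    intro s hs
    have : s = [] := List.eq_nil_of_length_eq_zero (Nat.le_zero.mp hs)
    subst this
    rw [pvScanT, pvScanT, pvRepl]
  | succ n ih =>
    intro s hs
    match s with
    | [] => rw [pvScanT, pvScanT, pvRepl]
    | c :: u =>
      rw [pvScanT, pvScanT, List.find?_append]
      cases hfind : (ts.find? (fun p => p.1.isPrefixOf (c :: u))) with
      | some q =>
        simp only [Option.some_or]
        rw [pvRepl_append t r q.2 _ (fun p hp => pvHb_no_prefix (hHbR q (List.mem_of_find?_eq_some hfind)) _ p hp)]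
        rw [ih (u.drop (q.1.length - 1)) (by simp at hs ⊢; omega)]
      | none =>
        simp only [Option.none_or]
        by_cases hp : t <+: (c :: u)
        · -- the new tag matches here
          rw [List.find?_cons_of_pos (by simpa using List.isPrefixOf_iff_prefix.mpr hp)]
          simp only []
          have hcu : c :: u = t ++ u.drop (t.length - 1) := by
            obtain ⟨w, hw⟩ := hp
            have hlen : t.length - 1 ≤ u.length := by
              have := congrArg List.length hw
              cases t with
              | nil => exact absurd rfl ht
              | cons a b => simp at this ⊢; omega
            conv_lhs => rw [← hw]
            congr 1
            have : u = t.drop 1 ++ w := by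
              cases t with
              | nil => exact absurd rfl ht
              | cons a b => simpa using congrArg (List.drop 1) hw.symm
            rw [this]
            cases t with
            | nil => exact absurd rfl ht
            | cons a b => simp
          have hscan : c :: pvScanT ts u = t ++ pvScanT ts (u.drop (t.length - 1)) := by
            have hs1 : pvScanT ts (c :: u) = c :: pvScanT ts u := by
              rw [pvScanT, hfind]
            rw [← hs1]
            conv_lhs => rw [hcu]
            exact pvScanT_append ts t _ (fun p hpl q hq => pvHb_no_prefix (hHbT q hq) _ p hpl)
          rw [hscan]
          cases htc : t with
          | nil => exact absurd htc ht
          | cons d t' =>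
            rw [List.cons_append, pvRepl]
            rw [if_pos (List.isPrefixOf_iff_prefix.mpr (by rw [← List.cons_append]; exact List.prefix_append _ _))]
            have hdrop : (t' ++ pvScanT ts (u.drop (t.length - 1))).drop ((d :: t').length - 1)
                = pvScanT ts (u.drop (t.length - 1)) := by
              simp
            rw [htc] at hdrop
            rw [hdrop, ← htc]
            rw [ih (u.drop (t.length - 1)) (by simp at hs ⊢; omega)]
        · -- no tag matches at this position
          rw [List.find?_cons_of_neg (by simpa using fun h => hp (List.isPrefixOf_iff_prefix.mp h))]
          simp only [List.find?_nil]
          rw [pvRepl]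
          rw [if_neg (by
            intro hpre
            have hpre' := List.isPrefixOf_iff_prefix.mp hpre
            cases htc : t with
            | nil => exact ht htc
            | cons d body =>
              rw [htc, List.cons_prefix_cons] at hpre'
              have hbody' : body <+: u :=
                pvScanT_reflect ts hr u.length u body (le_refl _)
                  (fun ch hch => by
                    have := List.all_eq_true.mp hbody ch (by simp [htc, hch])
                    simpa using this) hpre'.2
              exact hp (by rw [htc, hpre'.1]; exact List.cons_prefix_cons.mpr ⟨rfl, hbody'⟩))]
          rw [ih u (by simp at hs; omega)]

-- the five (tag, replacement) pairs the proofs talk about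
def pvTS : List (List Char × List Char) :=
  (PySem.Dict.items pvTagColorsB).map (fun p => (p.1.toList, (pvSpanB p.2 p.1).toList))

-- B's port computes the generic scan
theorem pvJoin_empty (xs : List (List Char)) : PySem.Chars.join [] xs = xs.flatten := by
  induction xs with
  | nil => rw [PySem.Chars.join_nil]; rfl
  | cons a l ih =>
    cases l with
    | nil => rw [PySem.Chars.join_singleton]; simp
    | cons b l' =>
      rw [PySem.Chars.join_cons_cons, ih]
      simp

theorem pvScanB_eq : ∀ (n : Nat) (s : List Char), s.length ≤ n →
    ((pvScanB s).map String.toList).flatten = pvScanT pvTS s := by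
  intro n
  induction n with
  | zero =>
    intro s hs
    have : s = [] := List.eq_nil_of_length_eq_zero (Nat.le_zero.mp hs)
    subst this
    rw [pvScanB, pvScanT]; simp
  | succ n ih =>
    intro s hs
    match s with
    | [] => rw [pvScanB, pvScanT]; simp
    | c :: u =>
      rw [pvScanB, pvScanT]
      have hfe : pvTS.find? (fun p => p.1.isPrefixOf (c :: u)) =
          ((PySem.Dict.items pvTagColorsB).find? (fun p => p.1.toList.isPrefixOf (c :: u))).map
            (fun p => (p.1.toList, (pvSpanB p.2 p.1).toList)) := by
        rw [pvTS, List.find?_map]; rfl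
      cases hfind : ((PySem.Dict.items pvTagColorsB).find?
          (fun p => p.1.toList.isPrefixOf (c :: u))) with
      | some q =>
        rw [hfe, hfind]
        simp only [Option.map_some]
        rw [List.map_cons, List.flatten_cons]
        rw [ih (u.drop (q.1.toList.length - 1)) (by simp at hs ⊢; omega)]
      | none =>
        rw [hfe, hfind]
        simp only [Option.map_none]
        rw [List.map_cons, List.flatten_cons]
        rw [ih u (by simp at hs; omega)]
        simp

theorem alt_toList (text : String) :
    (highlight_pii_tags_alt text).toList = pvScanT pvTS text.toList := by
  rw [highlight_pii_tags_alt, PySem.Str.toList_join]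
  have : ("" : String).toList = [] := rfl
  rw [this, pvJoin_empty]
  exact pvScanB_eq text.toList.length text.toList (le_refl _)

-- A's port computes the sequential replaces (as pvRepl)
theorem a_toList (text : String) :
    (highlight_pii_tags text).toList =
      pvRepl "[COLOR]".toList (pvSpanA "#EF4444" "[COLOR]").toList
        (pvRepl "[MONTH]".toList (pvSpanA "#8B5CF6" "[MONTH]").toList
          (pvRepl "[DAY]".toList (pvSpanA "#F59E0B" "[DAY]").toList
            (pvRepl "[STATE]".toList (pvSpanA "#10B981" "[STATE]").toList
              (pvRepl "[CITY]".toList (pvSpanA "#3B82F6" "[CITY]").toList text.toList)))) := by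
  show (highlight_pii_tags text).toList = _
  rw [highlight_pii_tags]
  have hitems : PySem.Dict.items pvTagColorsA =
      [("[CITY]", "#3B82F6"), ("[STATE]", "#10B981"), ("[DAY]", "#F59E0B"),
       ("[MONTH]", "#8B5CF6"), ("[COLOR]", "#EF4444")] := by decide
  rw [hitems]
  simp only [List.foldl]
  rw [PySem.Str.toList_replace, PySem.Str.toList_replace, PySem.Str.toList_replace,
      PySem.Str.toList_replace, PySem.Str.toList_replace]
  rw [pvReplace_eq _ _ _ (by decide), pvReplace_eq _ _ _ (by decide),
      pvReplace_eq _ _ _ (by decide), pvReplace_eq _ _ _ (by decide),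
      pvReplace_eq _ _ _ (by decide)]

-- ===== VERDICT (by name: the statement is the Claim_ definition above) =====
set_option maxRecDepth 8000 in
set_option maxHeartbeats 4000000 in
theorem highlight_pii_tags_spec : Claim_equal_highlight_pii_tags := by
  intro text _
  unfold Spec_highlight_pii_tags
  apply String.toList_inj.mp
  rw [a_toList, alt_toList]
  have hTS : pvTS =
      [("[CITY]".toList, (pvSpanA "#3B82F6" "[CITY]").toList),
       ("[STATE]".toList, (pvSpanA "#10B981" "[STATE]").toList),
       ("[DAY]".toList, (pvSpanA "#F59E0B" "[DAY]").toList),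
       ("[MONTH]".toList, (pvSpanA "#8B5CF6" "[MONTH]").toList),
       ("[COLOR]".toList, (pvSpanA "#EF4444" "[COLOR]").toList)] := by decide
  have h1 := pvStep [] ("[CITY]".toList) ((pvSpanA "#3B82F6" "[CITY]").toList)
    (by decide) (by decide) (by decide) (by decide) (by decide)
  have h2 := pvStep [("[CITY]".toList, (pvSpanA "#3B82F6" "[CITY]").toList)]
    ("[STATE]".toList) ((pvSpanA "#10B981" "[STATE]").toList)
    (by decide) (by decide) (by decide) (by decide) (by decide)
  have h3 := pvStep [("[CITY]".toList, (pvSpanA "#3B82F6" "[CITY]").toList),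
      ("[STATE]".toList, (pvSpanA "#10B981" "[STATE]").toList)]
    ("[DAY]".toList) ((pvSpanA "#F59E0B" "[DAY]").toList)
    (by decide) (by decide) (by decide) (by decide) (by decide)
  have h4 := pvStep [("[CITY]".toList, (pvSpanA "#3B82F6" "[CITY]").toList),
      ("[STATE]".toList, (pvSpanA "#10B981" "[STATE]").toList),
      ("[DAY]".toList, (pvSpanA "#F59E0B" "[DAY]").toList)]
    ("[MONTH]".toList) ((pvSpanA "#8B5CF6" "[MONTH]").toList)
    (by decide) (by decide) (by decide) (by decide) (by decide)
  have h5 := pvStep [("[CITY]".toList, (pvSpanA "#3B82F6" "[CITY]").toList),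
      ("[STATE]".toList, (pvSpanA "#10B981" "[STATE]").toList),
      ("[DAY]".toList, (pvSpanA "#F59E0B" "[DAY]").toList),
      ("[MONTH]".toList, (pvSpanA "#8B5CF6" "[MONTH]").toList)]
    ("[COLOR]".toList) ((pvSpanA "#EF4444" "[COLOR]").toList)
    (by decide) (by decide) (by decide) (by decide) (by decide)
  have e1 : pvRepl "[CITY]".toList (pvSpanA "#3B82F6" "[CITY]").toList text.toList
      = pvScanT [("[CITY]".toList, (pvSpanA "#3B82F6" "[CITY]").toList)] text.toList := by
    have := h1 text.toList.length text.toList (le_refl _)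
    rwa [pvScanT_nil] at this
  rw [e1]
  rw [h2 _ _ (le_refl _)]
  simp only [List.singleton_append]
  rw [h3 _ _ (le_refl _)]
  simp only [List.cons_append, List.nil_append]
  rw [h4 _ _ (le_refl _)]
  simp only [List.cons_append, List.nil_append]
  rw [h5 _ _ (le_refl _)]
  simp only [List.cons_append, List.nil_append]
  rw [hTS]
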